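-- pv_equiv track=rewrite | github.com/IHateThisMap/IdleClans_profits | io_helpers.py | adjust_parts_of_lines
-- ===== SOURCE A (Python) =====
-- def adjust_parts_of_lines(fragmented_lines_list, separator=" | "):
--     fragment_len_list = []
--     for fragmented_line in fragmented_lines_list:
--         for i in range(len(fragmented_line)):
--             if (len(fragment_len_list) < i+1):
--                 fragment_len_list.append(len(fragmented_line[i]))
--             elif fragment_len_list[i] < len(fragmented_line[i]):
--                 fragment_len_list[i] = len(fragmented_line[i])
--
--     result_lines_list = []
--     adjusted_fragment_lines_list = [[] for _ in fragmented_lines_list]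
--     line_counter = 0
--     for fragmented_line in fragmented_lines_list:
--         for i in range(len(fragmented_line)):
--             adjusted_fragment_lines_list[line_counter].append(fragmented_line[i].ljust(fragment_len_list[i]))
--         result_lines_list.append(separator.join(adjusted_fragment_lines_list[line_counter]))
--         line_counter += 1
--
--     return result_lines_list
-- ===== SOURCE B (Python) =====
-- def adjust_parts_of_lines(fragmented_lines_list, separator=" | "):
--     # Column-major construction: grow every output line one column at a time,
--     # computing each column's width on the fly; no widths list is kept.
--     bufs = [""] * len(fragmented_lines_list)
--     for col in range(max(map(len, fragmented_lines_list), default=0)):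
--         w = max((len(line[col]) for line in fragmented_lines_list if col < len(line)), default=0)
--         bufs = [buf + (separator if col else "") + line[col].ljust(w) if col < len(line) else buf
--                 for buf, line in zip(bufs, fragmented_lines_list)]
--     return bufs
-- ===== Notes on version B (the rewrite author's own statement) =====
-- stated objective: alternative
-- what changed: B abandons A's two row-major passes (a running-max width list, then per-row pad-and-join) and instead builds all output lines column-major: a single loop over column indices that computes that column's width on the fly and appends the padded fragment plus separator to every line buffer, so no widths list and no per-row join exist.
import Mathlib
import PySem

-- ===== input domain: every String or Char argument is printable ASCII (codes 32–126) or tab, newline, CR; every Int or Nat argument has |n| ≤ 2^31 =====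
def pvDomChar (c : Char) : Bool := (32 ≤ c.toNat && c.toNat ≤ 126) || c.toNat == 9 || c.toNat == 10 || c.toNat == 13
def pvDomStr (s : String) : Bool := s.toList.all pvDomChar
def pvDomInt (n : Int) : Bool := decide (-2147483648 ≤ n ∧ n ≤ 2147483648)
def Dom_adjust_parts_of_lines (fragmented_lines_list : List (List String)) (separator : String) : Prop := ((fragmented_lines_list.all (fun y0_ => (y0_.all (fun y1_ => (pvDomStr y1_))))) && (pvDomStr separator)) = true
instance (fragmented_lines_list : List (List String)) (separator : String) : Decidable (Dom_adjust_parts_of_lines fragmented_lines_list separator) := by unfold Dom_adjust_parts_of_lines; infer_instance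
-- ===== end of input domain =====

-- B builds the output lines COLUMN-MAJOR: it grows every line buffer one column at a time,
-- computing each column's width on the fly, instead of A's two row-major passes; alternative, not faster.

-- shared port of Python's s.ljust(w) (exact: pads with spaces when len(s) < w, else unchanged)
def pvLjust (s : String) (w : Nat) : String :=
  String.ofList (s.toList ++ List.replicate (w - s.toList.length) ' ')

-- Python string concatenation a + b (exact; via toList since Lean's String.append is kernel-opaque)
def pvCat (a b : String) : String := String.ofList (a.toList ++ b.toList)

-- ===== PORT A =====
-- one step of A's inner width loop (index i of the current line)
def aWidthStep (line : List String) (fl : List Nat) (i : Nat) : List Nat :=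
  if fl.length < i + 1 then fl ++ [(line.getD i "").toList.length]
  else if fl.getD i 0 < (line.getD i "").toList.length then fl.set i (line.getD i "").toList.length
  else fl

-- A's inner loop 'for i in range(len(fragmented_line))' over the running width list
def aWidthLine (fl : List Nat) (line : List String) : List Nat :=
  (List.range line.length).foldl (aWidthStep line) fl

def adjust_parts_of_lines (fragmented_lines_list : List (List String)) (separator : String) : List String :=
  let fragment_len_list := fragmented_lines_list.foldl aWidthLine []
  fragmented_lines_list.foldl
    (fun result_lines_list fragmented_line =>
      result_lines_list ++
        [PySem.Str.join separator
          ((List.range fragmented_line.length).foldl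
            (fun adjusted i => adjusted ++ [pvLjust (fragmented_line.getD i "") (fragment_len_list.getD i 0)]) [])])
    []

-- ===== PORT B =====
-- body of B's 'for col in range(...)' loop: this column's width (max over the rows that reach it,
-- Python max(..., default=0)), then the zip-comprehension rebuilding the line buffers
def bStep (lines : List (List String)) (separator : String) (col : Nat) (bufs : List String) : List String :=
  let w := PySem.List.maxD
    ((lines.filter (fun line => col < line.length)).map (fun line => (line.getD col "").toList.length)) id 0
  (bufs.zip lines).map (fun bl =>
    if col < bl.2.length then
      pvCat bl.1 (pvCat (if col = 0 then "" else separator) (pvLjust (bl.2.getD col "") w))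
    else bl.1)

def adjust_parts_of_lines_alt (fragmented_lines_list : List (List String)) (separator : String) : List String :=
  (List.range (PySem.List.maxD (fragmented_lines_list.map List.length) id 0)).foldl
    (fun bufs col => bStep fragmented_lines_list separator col bufs)
    (List.replicate fragmented_lines_list.length "")

-- ===== PRECONDITION & SPEC =====
def Spec_adjust_parts_of_lines (fragmented_lines_list : List (List String)) (separator : String) (out : List String) : Prop := out = adjust_parts_of_lines_alt fragmented_lines_list separator
instance (fragmented_lines_list : List (List String)) (separator : String) (out : List String) : Decidable (Spec_adjust_parts_of_lines fragmented_lines_list separator out) := by unfold Spec_adjust_parts_of_lines; infer_instance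

-- ===== CLAIM (what is proved, stated in full; the proofs are below) =====
def Claim_equal_adjust_parts_of_lines : Prop := ∀ (fragmented_lines_list : List (List String)) (separator : String), Dom_adjust_parts_of_lines fragmented_lines_list separator → Spec_adjust_parts_of_lines fragmented_lines_list separator (adjust_parts_of_lines fragmented_lines_list separator)

-- ===== LEMMAS AND PROOFS =====

-- contribution of one row to column i (0 if the row is too short)
def pvContrib (line : List String) (i : Nat) : Nat :=
  if i < line.length then (line.getD i "").toList.length else 0

def pvColMax (lines : List (List String)) (i : Nat) : Nat :=
  (lines.map (fun l => pvContrib l i)).foldr max 0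

def pvMaxLen (lines : List (List String)) : Nat :=
  (lines.map List.length).foldr max 0

-- B's output line for row l after the first c columns have been processed
def pvPartial (lines : List (List String)) (sep : String) (l : List String) (c : Nat) : String :=
  PySem.Str.join sep ((List.range (min c l.length)).map (fun i => pvLjust (l.getD i "") (pvColMax lines i)))

-- a list of Nats is the range-map of its own getD
theorem pv_map_getD_range (xs : List Nat) :
    (List.range xs.length).map (fun i => xs.getD i 0) = xs := by
  apply List.ext_getElem
  · simp
  · intro i h1 h2
    simp [List.getD_eq_getElem?_getD, List.getElem?_eq_getElem h2]

-- getD of a range-map, including the out-of-range default case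
theorem pv_getD_range_map (m : Nat) (f : Nat → Nat) (i : Nat) :
    ((List.range m).map f).getD i 0 = if i < m then f i else 0 := by
  by_cases h : i < m
  · rw [PySem.List.getD_map_range f m i 0 h, if_pos h]
  · rw [List.getD_eq_default _ _ (by simpa using Nat.le_of_not_lt h)]
    simp [h]

-- characterization of A's inner width loop, cut off at n
theorem pv_aWidth_aux (line : List String) (acc : List Nat) (n : Nat) (hn : n ≤ line.length) :
    (List.range n).foldl (aWidthStep line) acc =
      (List.range (max acc.length n)).map
        (fun i => max (acc.getD i 0) (if i < n then (line.getD i "").toList.length else 0)) := by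
  induction n with
  | zero =>
      simp only [List.range_zero, List.foldl_nil, Nat.max_zero, Nat.not_lt_zero, if_false]
      exact (pv_map_getD_range acc).symm
  | succ n ih =>
      have hn' : n ≤ line.length := Nat.le_of_succ_le hn
      rw [List.range_succ, List.foldl_append, ih hn', List.foldl_cons, List.foldl_nil]
      have hlen : ((List.range (max acc.length n)).map
        (fun i => max (acc.getD i 0) (if i < n then (line.getD i "").toList.length else 0))).length
          = max acc.length n := by simp
      unfold aWidthStep
      by_cases hc : acc.length ≤ n
      · have hm : max acc.length n = n := Nat.max_eq_right hc
        rw [if_pos (by omega)]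
        apply List.ext_getElem
        · simp; omega
        · intro i h1 h2
          have hi : i < n + 1 := by
            have := h1; simp [hm] at this; omega
          by_cases hin : i < n
          · rw [List.getElem_append_left (by simp [hm]; omega)]
            simp only [List.getElem_map, List.getElem_range]
            rw [if_pos hin, if_pos (by omega)]
          · have hieq : i = n := by omega
            subst hieq
            rw [List.getElem_append_right (by simp [hm])]
            have h0 : acc.getD i 0 = 0 := List.getD_eq_default _ _ (by omega)
            simp only [List.getElem_map, List.getElem_range, hm, List.length_map,
              List.length_range, Nat.sub_self, List.getElem_singleton]
            rw [h0, if_pos (by omega)]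
            omega
      · have hgt : n < acc.length := Nat.lt_of_not_le hc
        have hm : max acc.length n = acc.length := Nat.max_eq_left (Nat.le_of_lt hgt)
        have hm2 : max acc.length (n + 1) = acc.length := Nat.max_eq_left hgt
        rw [if_neg (by rw [hlen]; omega)]
        have hprevn :
            ((List.range (max acc.length n)).map
              (fun i => max (acc.getD i 0) (if i < n then (line.getD i "").toList.length else 0))).getD n 0
              = acc.getD n 0 := by
          rw [pv_getD_range_map]
          rw [if_pos (by omega), if_neg (by omega)]
          omega
        rw [hprevn]
        by_cases hset : acc.getD n 0 < (line.getD n "").toList.length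
        · rw [if_pos hset]
          apply List.ext_getElem
          · simp [hm, hm2]
          · intro i h1 h2
            have hi : i < acc.length := by
              have := h1; simp [hm] at this; omega
            by_cases hin : i = n
            · subst hin
              rw [List.getElem_set_self (by simp [hm]; omega)]
              simp only [List.getElem_map, List.getElem_range]
              rw [if_pos (by omega)]
              omega
            · rw [List.getElem_set_ne (by omega)]
              simp only [List.getElem_map, List.getElem_range]
              by_cases h3 : i < n
              · rw [if_pos h3, if_pos (by omega)]
              · rw [if_neg h3, if_neg (by omega)]
        · rw [if_neg hset]
          apply List.ext_getElem
          · simp [hm, hm2]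
          · intro i h1 h2
            simp only [List.getElem_map, List.getElem_range]
            by_cases h3 : i < n
            · rw [if_pos h3, if_pos (by omega)]
            · by_cases h4 : i = n
              · subst h4
                rw [if_neg h3, if_pos (by omega)]
                omega
              · rw [if_neg h3, if_neg (by omega)]

theorem pv_aWidthLine_eq (acc : List Nat) (line : List String) :
    aWidthLine acc line =
      (List.range (max acc.length line.length)).map
        (fun i => max (acc.getD i 0) (pvContrib line i)) := by
  unfold aWidthLine pvContrib
  exact pv_aWidth_aux line acc line.length (Nat.le_refl _)

-- A's whole first pass
theorem pv_fold_width (lines : List (List String)) (acc : List Nat) :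
    lines.foldl aWidthLine acc =
      (List.range (max acc.length (pvMaxLen lines))).map
        (fun i => max (acc.getD i 0) (pvColMax lines i)) := by
  induction lines generalizing acc with
  | nil =>
      simp only [List.foldl_nil, pvMaxLen, pvColMax, List.map_nil, List.foldr_nil, Nat.max_zero]
      exact (pv_map_getD_range acc).symm
  | cons l ls ih =>
      rw [List.foldl_cons, pv_aWidthLine_eq, ih]
      apply List.ext_getElem
      · simp [pvMaxLen, pvColMax]
      · intro i h1 h2
        simp only [List.getElem_map, List.getElem_range, pv_getD_range_map]
        simp only [pvColMax, List.map_cons, List.foldr_cons]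
        by_cases h : i < max acc.length l.length
        · rw [if_pos h]
          omega
        · have ha : acc.getD i 0 = 0 := List.getD_eq_default _ _ (by omega)
          have hc : pvContrib l i = 0 := by
            unfold pvContrib; rw [if_neg (by omega)]
          rw [if_neg h, ha, hc]
          omega

-- Python max(xs, default=0) over Nats is the fold of max
theorem pv_maxD_nat (xs : List Nat) : PySem.List.maxD xs id 0 = xs.foldr max 0 := by
  have hstep : ∀ (f : Option Nat → Nat → Option Nat), (∀ x, f none x = some x) →
      (∀ m x, f (some m) x = some (max m x)) →
      ∀ (ys : List Nat) (m : Nat), ys.foldl f (some m) = some (ys.foldl max m) := by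
    intro f h0 h1 ys
    induction ys with
    | nil => intro m; rfl
    | cons a ys ih => intro m; rw [List.foldl_cons, h1, ih, List.foldl_cons]
  have hfold : ∀ (ys : List Nat) (m : Nat), ys.foldl max m = max m (ys.foldr max 0) := by
    intro ys
    induction ys with
    | nil => intro m; simp
    | cons a ys ih => intro m; simp only [List.foldl_cons, List.foldr_cons, ih]; omega
  cases xs with
  | nil => rfl
  | cons x xs =>
      unfold PySem.List.maxD PySem.List.max?
      rw [List.foldl_cons]
      rw [hstep _ (fun x => rfl) (fun m x => by simp only [id_eq]; split <;> (congr 1; omega)) xs x]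
      simp only [Option.getD_some, List.foldr_cons]
      rw [hfold]

-- B's per-column max equals pvColMax
theorem pv_colmax_filter (lines : List (List String)) (i : Nat) :
    ((lines.filter (fun line => i < line.length)).map
      (fun line => (line.getD i "").toList.length)).foldr max 0 = pvColMax lines i := by
  induction lines with
  | nil => simp [pvColMax]
  | cons l ls ih =>
      by_cases h : i < l.length
      · simp [pvColMax, h, pvContrib, List.map_cons] at *
        rw [ih]
      · simp only [pvColMax, List.filter_cons, List.map_cons, List.foldr_cons] at *
        simp only [decide_eq_true_eq]
        rw [if_neg h, ih]
        simp [pvContrib, h]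

-- every row length is bounded by the fold of max of the lengths
theorem pv_mem_le_maxlen (lines : List (List String)) (l : List String) (h : l ∈ lines) :
    l.length ≤ pvMaxLen lines := by
  induction lines with
  | nil => simp at h
  | cons a as ih =>
      simp only [pvMaxLen, List.map_cons, List.foldr_cons]
      rcases List.mem_cons.mp h with h1 | h1
      · subst h1; exact Nat.le_max_left _ _
      · exact Nat.le_trans (ih h1) (Nat.le_max_right _ _)

-- zipping a mapped copy of a list with the list itself
theorem pv_zip_map_self {α β : Type} (f : α → β) (l : List α) :
    (l.map f).zip l = l.map (fun x => (f x, x)) := by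
  induction l with
  | nil => rfl
  | cons x xs ih => simp [ih]

-- sep.join(xs + [y]) appends (sep if xs else "") + y, on the Chars side
theorem pv_chars_join_snoc (sep : List Char) (xs : List (List Char)) (y : List Char) :
    PySem.Chars.join sep (xs ++ [y]) =
      PySem.Chars.join sep xs ++ (if xs = [] then [] else sep) ++ y := by
  induction xs with
  | nil => simp [PySem.Chars.join_nil, PySem.Chars.join_singleton]
  | cons x xs ih =>
      cases xs with
      | nil =>
          simp [PySem.Chars.join_cons_cons, PySem.Chars.join_singleton]
      | cons x' xs' =>
          rw [List.cons_append, List.cons_append, PySem.Chars.join_cons_cons,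
            PySem.Chars.join_cons_cons, ← List.cons_append, ih]
          simp

-- the same on strings, with pvCat
theorem pv_join_snoc (sep : String) (xs : List String) (y : String) :
    PySem.Str.join sep (xs ++ [y]) =
      pvCat (PySem.Str.join sep xs) (pvCat (if xs = [] then "" else sep) y) := by
  apply String.toList_inj.mp
  simp only [pvCat, String.toList_ofList, PySem.Str.toList_join, List.map_append, List.map_cons,
    List.map_nil, pv_chars_join_snoc]
  by_cases h : xs = []
  · subst h; simp
  · rw [if_neg h, if_neg (by simpa using h)]
    simp [List.append_assoc]

-- one column of B's loop advances every partial line by one fragment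
theorem pv_partial_succ (lines : List (List String)) (sep : String) (l : List String) (c : Nat) :
    pvPartial lines sep l (c + 1) =
      if c < l.length then
        pvCat (pvPartial lines sep l c)
          (pvCat (if c = 0 then "" else sep) (pvLjust (l.getD c "") (pvColMax lines c)))
      else pvPartial lines sep l c := by
  by_cases h : c < l.length
  · rw [if_pos h]
    unfold pvPartial
    have h1 : min (c + 1) l.length = c + 1 := by omega
    have h2 : min c l.length = c := by omega
    rw [h1, h2, List.range_succ, List.map_append, List.map_cons, List.map_nil, pv_join_snoc]
    congr 2
    by_cases hc : c = 0
    · subst hc; simp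
    · rw [if_neg hc, if_neg (by simpa using hc)]
  · rw [if_neg h]
    unfold pvPartial
    have : min (c + 1) l.length = min c l.length := by omega
    rw [this]

-- B's loop invariant: after the first c columns the buffers hold the partial lines
theorem pv_binv (lines : List (List String)) (sep : String) (c : Nat) :
    (List.range c).foldl (fun bufs col => bStep lines sep col bufs)
        (List.replicate lines.length "") =
      lines.map (fun l => pvPartial lines sep l c) := by
  induction c with
  | zero =>
      simp only [List.range_zero, List.foldl_nil]
      have : ∀ l : List String, pvPartial lines sep l 0 = "" := by
        intro l
        unfold pvPartial
        simp only [Nat.zero_min, List.range_zero, List.map_nil]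
        apply String.toList_inj.mp
        simp [PySem.Str.toList_join, PySem.Chars.join_nil]
      simp only [this]
      exact (List.map_const').symm
  | succ c ih =>
      rw [List.range_succ, List.foldl_append, ih, List.foldl_cons, List.foldl_nil]
      unfold bStep
      rw [pv_zip_map_self, List.map_map]
      have hw : PySem.List.maxD
          ((lines.filter (fun line => c < line.length)).map
            (fun line => (line.getD c "").toList.length)) id 0 = pvColMax lines c := by
        rw [pv_maxD_nat, pv_colmax_filter]
      rw [hw]
      apply List.map_congr_left
      intro l _
      simp only [Function.comp]
      exact (pv_partial_succ lines sep l c).symm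

-- ===== VERDICT (by name: the statement is the Claim_ definition above) =====
theorem adjust_parts_of_lines_spec : Claim_equal_adjust_parts_of_lines := by
  intro lines sep _
  unfold Spec_adjust_parts_of_lines adjust_parts_of_lines adjust_parts_of_lines_alt
  simp only []
  -- A's width list
  have hfl : lines.foldl aWidthLine [] =
      (List.range (pvMaxLen lines)).map (fun i => pvColMax lines i) := by
    rw [pv_fold_width]
    simp
  rw [hfl]
  -- A's second pass: two appended-singleton loops become maps
  rw [PySem.List.foldl_append_singleton_eq_map
    (fun fragmented_line => PySem.Str.join sep
      ((List.range fragmented_line.length).foldl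
        (fun adjusted i => adjusted ++
          [pvLjust (fragmented_line.getD i "")
            (((List.range (pvMaxLen lines)).map (fun i => pvColMax lines i)).getD i 0)]) []))
    lines [], List.nil_append]
  -- B's loop via its invariant
  rw [pv_binv lines sep (PySem.List.maxD (lines.map List.length) id 0)]
  apply List.map_congr_left
  intro line hmem
  have hlen : line.length ≤ pvMaxLen lines := pv_mem_le_maxlen lines line hmem
  have hncols : line.length ≤ PySem.List.maxD (lines.map List.length) id 0 := by
    rw [pv_maxD_nat]
    exact pv_mem_le_maxlen lines line hmem
  rw [PySem.List.foldl_append_singleton_eq_map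
    (fun i => pvLjust (line.getD i "")
      (((List.range (pvMaxLen lines)).map (fun j => pvColMax lines j)).getD i 0)) _ [],
    List.nil_append]
  unfold pvPartial
  rw [Nat.min_eq_right hncols]
  congr 1
  apply List.map_congr_left
  intro i hi
  have hi' : i < line.length := List.mem_range.mp hi
  rw [PySem.List.getD_map_range _ _ _ _ (by omega)]
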